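-- pv_equiv track=rewrite | github.com/iamar7/Mining-and-Summarising-Customer-Review | features_per_sentence.py | transaction
-- ===== SOURCE A (Python) =====
-- def transaction(arr):
-- 	tmp = []
-- 	bit = []
-- 	h, w, n = 0, 0, len(arr)
-- 	for i in range(0, n):
-- 		bit.append(0)
-- 		m, w = len(arr[i]), 0
-- 		for j in range(0, m):
-- 			if arr[i][j][1] == "NN" or arr[i][j][1] == "NNS" or arr[i][j][1] == "NNP" or arr[i][j][1] == "NNPS":
-- 				if w == 0:
-- 					tmp.append([])
-- 				tmp[h].append(str(arr[i][j][0]))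
-- 				w += 1
-- 				bit[i] += 1
-- 		if w >= 1:
-- 			h += 1
-- 	return tmp, bit
-- ===== SOURCE B (Python) =====
-- NOUN = ("NN", "NNS", "NNP", "NNPS")
--
-- def transaction(arr):
--     # Flatten all noun words of the whole document into one flat list,
--     # compute per-sentence noun counts, then cut the flat list back into
--     # per-sentence chunks by those counts, skipping empty chunks.
--     flat = [str(tok) for sent in arr for tok, tag in sent if tag in NOUN]
--     bit = [sum(tag in NOUN for _, tag in sent) for sent in arr]
--     tmp, pos = [], 0
--     for c in bit:
--         if c:
--             tmp.append(flat[pos:pos + c])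
--         pos += c
--     return tmp, bit
-- ===== Notes on version B (the rewrite author's own statement) =====
-- stated objective: alternative
-- what changed: Instead of A's single interleaved pass that grows the nested tmp in place via cursors h/w, B never builds per-sentence noun lists directly: it flattens all noun words of the document into one flat list, computes per-sentence counts separately, and reconstructs tmp by slicing the flat list into chunks of those counts, skipping zero chunks.
import Mathlib
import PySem

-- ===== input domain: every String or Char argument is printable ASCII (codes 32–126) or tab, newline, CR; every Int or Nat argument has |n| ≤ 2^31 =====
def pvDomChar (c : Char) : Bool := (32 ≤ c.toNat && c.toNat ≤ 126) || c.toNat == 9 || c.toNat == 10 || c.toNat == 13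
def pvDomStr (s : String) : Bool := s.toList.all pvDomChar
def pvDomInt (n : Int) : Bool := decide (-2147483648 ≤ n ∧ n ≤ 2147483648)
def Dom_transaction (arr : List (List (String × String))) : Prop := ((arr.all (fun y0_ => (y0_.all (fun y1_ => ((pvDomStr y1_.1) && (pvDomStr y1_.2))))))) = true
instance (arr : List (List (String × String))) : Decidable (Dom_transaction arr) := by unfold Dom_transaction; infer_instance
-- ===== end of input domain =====

-- B replaces A's single interleaved pass (cursors h/w, in-place growth of the nested tmp) by
-- flattening all noun words into one flat list, computing per-sentence counts, and re-chunking
-- the flat list by those counts; objective: alternative.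

-- ===== PORT A =====
-- A iterates `for i in range(0,n)` over arr and `for j in range(0,m)` over arr[i]; we fold over
-- `PySem.List.enumerate arr` (resp. over the sentence itself), which visits exactly the same
-- (i, arr[i]) (resp. arr[i][j]) in the same order, so indexing is exact.  `tmp[h].append(x)` and
-- `bit[i] += 1` become `List.modify` at h / i.toNat (h and the i from enumerate are always valid
-- in-range indices here, so this is exact).  `str(arr[i][j][0])` is `tok.1` (already a string).
def transInnerStep (i : Int) (h : Nat)
    (st2 : List (List String) × List Int × Nat) (tok : String × String) :
    List (List String) × List Int × Nat :=
  let tmp := st2.1; let bit := st2.2.1; let w := st2.2.2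
  if tok.2 == "NN" || tok.2 == "NNS" || tok.2 == "NNP" || tok.2 == "NNPS" then
    let tmp := if w == 0 then tmp ++ [[]] else tmp
    let tmp := tmp.modify h (· ++ [tok.1])
    let bit := bit.modify i.toNat (· + 1)
    (tmp, bit, w + 1)
  else (tmp, bit, w)

def transOuterStep (st : List (List String) × List Int × Nat)
    (p : Int × List (String × String)) : List (List String) × List Int × Nat :=
  let bit := st.2.1 ++ [(0 : Int)]
  let st2 := p.2.foldl (transInnerStep p.1 st.2.2) (st.1, bit, 0)
  if st2.2.2 ≥ 1 then (st2.1, st2.2.1, st.2.2 + 1) else (st2.1, st2.2.1, st.2.2)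

def transaction (arr : List (List (String × String))) : List (List String) × List Int :=
  let st := (PySem.List.enumerate arr).foldl transOuterStep ([], [], 0)
  (st.1, st.2.1)

-- ===== PORT B =====
-- B: flatten all noun words, count nouns per sentence, re-chunk the flat list by the counts.
-- `tag in NOUN` (NOUN a tuple) is membership, ported as List.contains;
-- `flat[pos:pos+c]` is PySem.List.slice; `sum(bool for …)` is a fold adding 0/1.
def pvNounTags : List String := ["NN", "NNS", "NNP", "NNPS"]

def pvChunkStep (flat : List String) (st : List (List String) × Int) (c : Int) :
    List (List String) × Int :=
  let tmp := if c ≠ 0 then st.1 ++ [PySem.List.slice flat (some st.2) (some (st.2 + c))] else st.1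
  (tmp, st.2 + c)

def transaction_alt (arr : List (List (String × String))) : List (List String) × List Int :=
  let flat := arr.flatMap (fun sent =>
    (sent.filter (fun t => pvNounTags.contains t.2)).map (·.1))
  let bit := arr.map (fun sent =>
    sent.foldl (fun s t => s + (if pvNounTags.contains t.2 then (1 : Int) else 0)) 0)
  let st := bit.foldl (pvChunkStep flat) ([], 0)
  (st.1, bit)

-- ===== PRECONDITION & SPEC =====
def Spec_transaction (arr : List (List (String × String))) (out : List (List String) × List Int) : Prop := out = transaction_alt arr
instance (arr : List (List (String × String))) (out : List (List String) × List Int) : Decidable (Spec_transaction arr out) := by unfold Spec_transaction; infer_instance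

-- ===== CLAIM (what is proved, stated in full; the proofs are below) =====
def Claim_equal_transaction : Prop := ∀ (arr : List (List (String × String))), Dom_transaction arr → Spec_transaction arr (transaction arr)

-- ===== LEMMAS AND PROOFS =====

def pvNouns (sent : List (String × String)) : List String :=
  (sent.filter (fun t => t.2 == "NN" || t.2 == "NNS" || t.2 == "NNP" || t.2 == "NNPS")).map (·.1)

-- the tmp entry a partially-scanned sentence contributes: nothing while empty, a single block once nonempty
def pvCond (xs : List String) : List (List String) :=
  if xs.isEmpty then [] else [xs]

lemma pv_modify_append {α : Type} (l : List α) (x : α) (f : α → α) :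
    (l ++ [x]).modify l.length f = l ++ [f x] := by
  induction l with
  | nil => rfl
  | cons a t ih => simpa [List.modify] using ih

lemma pv_inner (sent : List (String × String)) (tmp0 : List (List String)) (bit0 : List Int)
    (i : Int) (hi : i.toNat = bit0.length) (acc : List String) :
    sent.foldl (transInnerStep i tmp0.length)
      (tmp0 ++ pvCond acc, bit0 ++ [(acc.length : Int)], acc.length)
    = (tmp0 ++ pvCond (acc ++ pvNouns sent),
       bit0 ++ [((acc ++ pvNouns sent).length : Int)],
       (acc ++ pvNouns sent).length) := by
  induction sent generalizing acc with
  | nil => simp [pvNouns]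
  | cons tok rest ih =>
    by_cases hp : (tok.2 == "NN" || tok.2 == "NNS" || tok.2 == "NNP" || tok.2 == "NNPS") = true
    · have hstep : transInnerStep i tmp0.length
          (tmp0 ++ pvCond acc, bit0 ++ [(acc.length : Int)], acc.length) tok
          = (tmp0 ++ pvCond (acc ++ [tok.1]), bit0 ++ [((acc ++ [tok.1]).length : Int)],
             (acc ++ [tok.1]).length) := by
        rcases acc with _ | ⟨a, as⟩
        · simp [transInnerStep, hp, pvCond, hi, pv_modify_append]
        · simp [transInnerStep, hp, pvCond, hi, pv_modify_append]
      have hn : pvNouns (tok :: rest) = tok.1 :: pvNouns rest := by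
        simp [pvNouns, hp]
      rw [List.foldl_cons, hstep, ih (acc ++ [tok.1])]
      simp [hn, List.append_assoc]
    · have hstep : transInnerStep i tmp0.length
          (tmp0 ++ pvCond acc, bit0 ++ [(acc.length : Int)], acc.length) tok
          = (tmp0 ++ pvCond acc, bit0 ++ [(acc.length : Int)], acc.length) := by
        simp [transInnerStep, hp]
      have hn : pvNouns (tok :: rest) = pvNouns rest := by
        simp [pvNouns, hp]
      rw [List.foldl_cons, hstep, ih acc, hn]

lemma pv_outer (rest : List (List (String × String))) (tmp0 : List (List String)) (bit0 : List Int) :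
    (PySem.List.enumerate rest (bit0.length : Int)).foldl transOuterStep (tmp0, bit0, tmp0.length)
    = (tmp0 ++ (rest.map pvNouns).filter (fun x => !x.isEmpty),
       bit0 ++ (rest.map pvNouns).map (fun x => (x.length : Int)),
       (tmp0 ++ (rest.map pvNouns).filter (fun x => !x.isEmpty)).length) := by
  induction rest generalizing tmp0 bit0 with
  | nil => simp
  | cons sent rest ih =>
    rw [PySem.List.enumerate_cons, List.foldl_cons]
    have hin := pv_inner sent tmp0 bit0 (bit0.length : Int) (by simp) []
    simp only [List.append_nil, List.nil_append, pvCond, List.isEmpty_nil, if_pos,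
      List.length_nil, Nat.cast_zero] at hin
    have hstep : transOuterStep (tmp0, bit0, tmp0.length) ((bit0.length : Int), sent)
        = (tmp0 ++ pvCond (pvNouns sent), bit0 ++ [((pvNouns sent).length : Int)],
           (tmp0 ++ pvCond (pvNouns sent)).length) := by
      unfold transOuterStep
      simp only [hin]
      rcases h : pvNouns sent with _ | ⟨a, as⟩ <;> simp [pvCond]
    rw [hstep]
    have hlen : ((bit0.length : Int) + 1)
        = (((bit0 ++ [((pvNouns sent).length : Int)]).length : Nat) : Int) := by simp
    rw [hlen, ih]
    rcases h : pvNouns sent with _ | ⟨a, as⟩ <;>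
      simp [pvCond, h, List.append_assoc]

-- B-side lemmas ------------------------------------------------------------

lemma pv_contains_eq (s : String) :
    pvNounTags.contains s = (s == "NN" || s == "NNS" || s == "NNP" || s == "NNPS") := by
  have h : ∀ t : String, (s == t) = decide (s = t) := fun t => by
    by_cases hst : s = t <;> simp [hst]
  simp [pvNounTags, Bool.or_assoc, h]

lemma pv_flat_eq (arr : List (List (String × String))) :
    arr.flatMap (fun sent => (sent.filter (fun t => pvNounTags.contains t.2)).map (·.1))
      = (arr.map pvNouns).flatten := by
  simp only [List.flatten_eq_flatMap, List.flatMap_map]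
  apply List.flatMap_congr
  intro sent _
  simp only [pvNouns]
  congr 1
  apply List.filter_congr
  intro t _
  exact pv_contains_eq t.2

lemma pv_count_eq (sent : List (String × String)) (s : Int) :
    sent.foldl (fun s t => s + (if pvNounTags.contains t.2 then (1 : Int) else 0)) s
      = s + ((pvNouns sent).length : Int) := by
  induction sent generalizing s with
  | nil => simp [pvNouns]
  | cons tok rest ih =>
    rw [List.foldl_cons, ih]
    by_cases hp : (tok.2 == "NN" || tok.2 == "NNS" || tok.2 == "NNP" || tok.2 == "NNPS") = true
    · simp only [pv_contains_eq, hp, if_true, pvNouns, List.filter_cons, List.map_cons,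
        List.length_cons]
      push_cast; ring
    · simp only [pv_contains_eq, hp, pvNouns, List.filter_cons]
      simp

lemma pv_chunk (per : List (List String)) (pre : List String) (flat : List String)
    (hflat : flat = pre ++ per.flatten) (tmp0 : List (List String)) :
    (per.map (fun x => (x.length : Int))).foldl (pvChunkStep flat) (tmp0, (pre.length : Int))
      = (tmp0 ++ per.filter (fun x => !x.isEmpty), ((pre ++ per.flatten).length : Int)) := by
  induction per generalizing pre tmp0 with
  | nil => simp
  | cons x rest ih =>
    rw [List.map_cons, List.foldl_cons]
    rcases x with _ | ⟨a, as⟩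
    · have h0 : pvChunkStep flat (tmp0, (pre.length : Int)) (([] : List String).length : Int)
          = (tmp0, (pre.length : Int)) := by
        simp [pvChunkStep]
      rw [h0, ih pre (by simpa using hflat) tmp0]
      simp
    · have hslice : PySem.List.slice flat (some (pre.length : Int))
          (some ((pre.length : Int) + ((as.length : Int) + 1))) = a :: as := by
        have hcast : ((as.length : Int) + 1) = (((a :: as).length : Nat) : Int) := by
          simp
        rw [hcast, PySem.List.slice_natCast_add]
        simp only [hflat, List.flatten_cons]
        rw [List.drop_left, List.take_left]
      have hne : ¬((as.length : Int) + 1 = 0) := by omega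
      have hstep : pvChunkStep flat (tmp0, (pre.length : Int)) ((a :: as).length : Int)
          = (tmp0 ++ [a :: as], ((pre ++ a :: as).length : Int)) := by
        simp [pvChunkStep, hne, hslice]
      rw [hstep, ih (pre ++ a :: as) (by simp [hflat]) (tmp0 ++ [a :: as])]
      simp [List.append_assoc]

lemma pv_alt_eq (arr : List (List (String × String))) :
    transaction_alt arr
      = ((arr.map pvNouns).filter (fun x => !x.isEmpty),
         (arr.map pvNouns).map (fun x => (x.length : Int))) := by
  unfold transaction_alt
  have hbit : arr.map (fun sent =>
      sent.foldl (fun s t => s + (if pvNounTags.contains t.2 then (1 : Int) else 0)) 0)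
      = (arr.map pvNouns).map (fun x => (x.length : Int)) := by
    rw [List.map_map]
    apply List.map_congr_left
    intro sent _
    simpa using pv_count_eq sent 0
  simp only [hbit, pv_flat_eq]
  have h := pv_chunk (arr.map pvNouns) [] (arr.map pvNouns).flatten (by simp) []
  simp only [List.length_nil, Nat.cast_zero, List.nil_append] at h
  rw [h]

-- ===== VERDICT (by name: the statement is the Claim_ definition above) =====
theorem transaction_spec : Claim_equal_transaction := by
  intro arr _
  show transaction arr = transaction_alt arr
  have h := pv_outer arr [] []
  simp only [List.length_nil, Nat.cast_zero, List.nil_append] at h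
  simp only [transaction, h, pv_alt_eq]
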